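-- pv_equiv track=rewrite | github.com/mashi727/markdown_uploader | src/markdown_parser.py | is_latex_code_block
-- ===== SOURCE A (Python) =====
-- def is_latex_code_block(lang: str, content: str) -> bool:
--     """コードブロックがLaTeXコードかどうかを判定する"""
--     # 言語指定が数学関連かどうか
--     if lang in ('math', 'latex', 'tex'):
--         return True
--
--     # 内容がLaTeXのパターンを含むかどうか
--     latex_patterns = [
--         r'\\begin{', r'\\end{', r'\\frac', r'\\sum', r'\\int',
--         r'\\lim', r'\\nabla', r'\\partial', r'\\alpha', r'\\beta',
--         r'\\gamma', r'\\delta', r'\\epsilon', r'\\zeta', r'\\eta',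
--         r'\\theta', r'\\iota', r'\\kappa', r'\\lambda', r'\\mu',
--         r'\\nu', r'\\xi', r'\\pi', r'\\rho', r'\\sigma', r'\\tau',
--         r'\\upsilon', r'\\phi', r'\\chi', r'\\psi', r'\\omega',
--         r'\\left', r'\\right', r'\\mathbf', r'\\mathcal', r'\\mathrm',
--         r'\\cdot', r'\\times', r'\\div', r'\\pm', r'\\mp',
--         r'\\cap', r'\\cup', r'\\subset', r'\\supset', r'\\in',
--         r'\\notin', r'\\forall', r'\\exists', r'\\neg', r'\\vee',
--         r'\\wedge', r'\\Rightarrow', r'\\Leftarrow', r'\\Leftrightarrow'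
--     ]
--
--     return any(pattern in content for pattern in latex_patterns)
-- ===== SOURCE B (Python) =====
-- # One left-to-right scan of content: at each occurrence of two consecutive
-- # backslashes, test whether a LaTeX keyword follows; the keyword table is a
-- # single space-separated blob split once at import time.
-- _KEYWORDS = (
--     "begin{ end{ frac sum int lim nabla partial "
--     "alpha beta gamma delta epsilon zeta eta theta iota kappa "
--     "lambda mu nu xi pi rho sigma tau upsilon phi chi psi omega "
--     "left right mathbf mathcal mathrm cdot times div pm mp "
--     "cap cup subset supset in notin forall exists neg vee wedge "
--     "Rightarrow Leftarrow Leftrightarrow"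
-- ).split()
--
-- def is_latex_code_block(lang: str, content: str) -> bool:
--     if lang in ('math', 'latex', 'tex'):
--         return True
--     for i in range(len(content) - 1):
--         if content[i] == '\\' and content[i + 1] == '\\':
--             rest = content[i + 2:]
--             if any(rest.startswith(k) for k in _KEYWORDS):
--                 return True
--     return False
-- ===== Notes on version B (the rewrite author's own statement) =====
-- stated objective: alternative
-- what changed: Replaced the 55 independent whole-content substring searches with a single left-to-right scan of content that, at each occurrence of two consecutive backslashes, tests whether one of the keywords follows; the keyword table is one space-separated blob split once rather than a 55-element literal list.
import Mathlib
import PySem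

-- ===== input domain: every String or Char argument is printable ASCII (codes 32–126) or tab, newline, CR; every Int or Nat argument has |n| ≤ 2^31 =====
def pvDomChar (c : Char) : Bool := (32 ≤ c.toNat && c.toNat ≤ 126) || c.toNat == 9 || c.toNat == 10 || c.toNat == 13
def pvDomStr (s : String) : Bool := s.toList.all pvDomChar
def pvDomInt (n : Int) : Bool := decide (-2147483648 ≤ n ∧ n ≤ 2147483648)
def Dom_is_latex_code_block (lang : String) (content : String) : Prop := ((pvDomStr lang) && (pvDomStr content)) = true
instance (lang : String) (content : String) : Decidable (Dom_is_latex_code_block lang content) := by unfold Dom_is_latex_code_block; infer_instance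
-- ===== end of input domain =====

-- B replaces A's 55 whole-content substring searches by one left-to-right scan of
-- content testing a keyword table (one blob string, split once) only where two
-- consecutive backslashes occur (objective: alternative algorithm, same result).

-- ===== PORT A =====
def latexPatterns : List String := ["\\\\begin{", "\\\\end{", "\\\\frac", "\\\\sum", "\\\\int", "\\\\lim", "\\\\nabla", "\\\\partial", "\\\\alpha", "\\\\beta", "\\\\gamma", "\\\\delta", "\\\\epsilon", "\\\\zeta", "\\\\eta", "\\\\theta", "\\\\iota", "\\\\kappa", "\\\\lambda", "\\\\mu", "\\\\nu", "\\\\xi", "\\\\pi", "\\\\rho", "\\\\sigma", "\\\\tau", "\\\\upsilon", "\\\\phi", "\\\\chi", "\\\\psi", "\\\\omega", "\\\\left", "\\\\right", "\\\\mathbf", "\\\\mathcal", "\\\\mathrm", "\\\\cdot", "\\\\times", "\\\\div", "\\\\pm", "\\\\mp", "\\\\cap", "\\\\cup", "\\\\subset", "\\\\supset", "\\\\in", "\\\\notin", "\\\\forall", "\\\\exists", "\\\\neg", "\\\\vee", "\\\\wedge", "\\\\Rightarrow", "\\\\Leftarrow", "\\\\Leftrightarrow"]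

def is_latex_code_block (lang : String) (content : String) : Bool :=
  if lang == "math" || lang == "latex" || lang == "tex" then true
  else latexPatterns.any (fun p => PySem.Str.isIn p content)

-- ===== PORT B =====
-- the keyword blob of Source B (as a char list; the literal is chunked only because a
-- single long String literal reduces quadratically in the kernel — the value is
-- exactly Source B's blob), then str.split() on it
def keywordChars : List Char :=
  "begin{ end{ frac sum int lim nabla partial ".toList ++
  "alpha beta gamma delta epsilon zeta eta theta iota kappa ".toList ++
  "lambda mu nu xi pi rho sigma tau upsilon phi chi psi omega ".toList ++
  "left right mathbf mathcal mathrm cdot times div pm mp ".toList ++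
  "cap cup subset supset in notin forall exists neg vee wedge ".toList ++
  "Rightarrow Leftarrow Leftrightarrow".toList

def latexKeywords : List (List Char) := PySem.Chars.split₀ keywordChars

-- the scan loop of Source B: positions i with content[i]=content[i+1]='\', then startswith
def altScan : List Char → Bool
  | c :: c2 :: tail =>
      (c == '\\' && c2 == '\\'
        && latexKeywords.any (fun k => PySem.Chars.startswith tail k))
      || altScan (c2 :: tail)
  | _ => false

def is_latex_code_block_alt (lang : String) (content : String) : Bool :=
  if lang == "math" || lang == "latex" || lang == "tex" then true
  else altScan content.toList

-- ===== PRECONDITION & SPEC =====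
def Spec_is_latex_code_block (lang : String) (content : String) (out : Bool) : Prop := out = is_latex_code_block_alt lang content
instance (lang : String) (content : String) (out : Bool) : Decidable (Spec_is_latex_code_block lang content out) := by unfold Spec_is_latex_code_block; infer_instance

-- ===== CLAIM (what is proved, stated in full; the proofs are below) =====
def Claim_equal_is_latex_code_block : Prop := ∀ (lang : String) (content : String), Dom_is_latex_code_block lang content → Spec_is_latex_code_block lang content (is_latex_code_block lang content)

-- ===== LEMMAS AND PROOFS =====

set_option maxRecDepth 4000 in
theorem patterns_eq : latexPatterns.map String.toList = latexKeywords.map (fun k => '\\' :: '\\' :: k) := by decide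

theorem altScan_iff (cs : List Char) :
    altScan cs = true ↔ ∃ k ∈ latexKeywords, ('\\' :: '\\' :: k) <:+: cs := by
  induction cs with
  | nil =>
    simp only [altScan, Bool.false_eq_true, false_iff]
    rintro ⟨k, hk, hin⟩
    simp [List.infix_nil] at hin
  | cons c rest ih =>
    cases rest with
    | nil =>
      simp only [altScan, Bool.false_eq_true, false_iff]
      rintro ⟨k, hk, hin⟩
      have := hin.length_le
      simp at this
    | cons c2 tail =>
      simp only [altScan, Bool.or_eq_true, Bool.and_eq_true, beq_iff_eq,
        List.any_eq_true, PySem.Chars.startswith_iff, ih]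
      constructor
      · rintro (⟨⟨hc, hc2⟩, k, hk, hpre⟩ | ⟨k, hk, hin⟩)
        · exact ⟨k, hk, List.infix_cons_iff.mpr (Or.inl (by
            subst hc; subst hc2
            exact List.cons_prefix_cons.mpr ⟨rfl, List.cons_prefix_cons.mpr ⟨rfl, hpre⟩⟩))⟩
        · exact ⟨k, hk, List.infix_cons_iff.mpr (Or.inr hin)⟩
      · rintro ⟨k, hk, hin⟩
        rcases List.infix_cons_iff.mp hin with hpre | hin
        · rcases List.cons_prefix_cons.mp hpre with ⟨hc, hpre⟩
          rcases List.cons_prefix_cons.mp hpre with ⟨hc2, hpre⟩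
          exact Or.inl ⟨⟨hc.symm, hc2.symm⟩, k, hk, hpre⟩
        · exact Or.inr ⟨k, hk, hin⟩

-- ===== VERDICT (by name: the statement is the Claim_ definition above) =====
theorem is_latex_code_block_spec : Claim_equal_is_latex_code_block := by
  intro lang content _
  unfold Spec_is_latex_code_block is_latex_code_block is_latex_code_block_alt
  by_cases h : (lang == "math" || lang == "latex" || lang == "tex") = true
  · simp [h]
  · simp only [h, if_neg, Bool.false_eq_true, not_false_eq_true]
    rw [Bool.eq_iff_iff, altScan_iff, List.any_eq_true]
    constructor
    · rintro ⟨p, hp, hin⟩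
      rw [PySem.Str.isIn_iff_infix] at hin
      have : p.toList ∈ latexPatterns.map String.toList := List.mem_map_of_mem hp
      rw [patterns_eq, List.mem_map] at this
      obtain ⟨k, hk, hke⟩ := this
      exact ⟨k, hk, hke ▸ hin⟩
    · rintro ⟨k, hk, hin⟩
      have : ('\\' :: '\\' :: k) ∈ latexPatterns.map String.toList := by
        rw [patterns_eq]; exact List.mem_map_of_mem hk
      rw [List.mem_map] at this
      obtain ⟨p, hp, hpe⟩ := this
      exact ⟨p, hp, by rw [PySem.Str.isIn_iff_infix, hpe]; exact hin⟩
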